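-- pv_equiv track=rewrite | github.com/Bhardwaj-14/origin-ai-dev | Backend/Automation.py | command_splitter
-- ===== SOURCE A (Python) =====
-- def command_splitter(raw: str) -> list[str]:
--     words = raw.split()
--     cmds = []
--     current = []
--
--     keywords = ["open", "close", "play", "content", "google", "youtube", "system"]
--
--     for word in words:
--         if word in keywords:
--             if current:
--                 cmds.append(" ".join(current))
--                 current = []
--         current.append(word)
--
--     if current:
--         cmds.append(" ".join(current))
--
--     return cmds
-- ===== SOURCE B (Python) =====
-- KEYWORDS = ["open", "close", "play", "content", "google", "youtube", "system"]
--
--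
-- def command_splitter(raw: str) -> list[str]:
--     words = raw.split()
--     cmds = []
--     while words:
--         j = 1
--         while j < len(words) and words[j] not in KEYWORDS:
--             j += 1
--         cmds.append(" ".join(words[:j]))
--         words = words[j:]
--     return cmds
-- ===== Notes on version B (the rewrite author's own statement) =====
-- stated objective: alternative
-- what changed: Replaces A's incremental (cmds, current) accumulator fold with a greedy two-pointer scan that finds the next keyword boundary and emits each whole chunk by slicing directly.
import Mathlib
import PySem

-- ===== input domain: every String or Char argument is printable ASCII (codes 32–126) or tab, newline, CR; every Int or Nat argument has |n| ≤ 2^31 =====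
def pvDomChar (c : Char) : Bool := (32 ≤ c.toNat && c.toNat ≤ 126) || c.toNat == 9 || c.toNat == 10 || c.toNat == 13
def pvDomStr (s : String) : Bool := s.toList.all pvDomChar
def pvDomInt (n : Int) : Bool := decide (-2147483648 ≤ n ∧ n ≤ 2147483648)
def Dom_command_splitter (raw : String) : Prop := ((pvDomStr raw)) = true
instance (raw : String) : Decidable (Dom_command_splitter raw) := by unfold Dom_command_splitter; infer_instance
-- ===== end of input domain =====

-- B replaces A's incremental (cmds, current) accumulator with a greedy two-pointer scan that
-- emits each whole chunk (head word up to the next keyword) directly; objective: alternative decomposition.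

-- ===== PORT A =====
def pvKeywords : List String := ["open", "close", "play", "content", "google", "youtube", "system"]

-- the loop body of A: maybe flush `current`, then append the word
def pvStep (st : List String × List String) (word : String) : List String × List String :=
  let st' :=
    if pvKeywords.contains word then
      if st.2.isEmpty = false then (st.1 ++ [PySem.Str.join " " st.2], ([] : List String))
      else st
    else st
  (st'.1, st'.2 ++ [word])

def command_splitter (raw : String) : List String :=
  let words := PySem.Str.split₀ raw
  let st := words.foldl pvStep ([], [])
  if st.2.isEmpty = false then st.1 ++ [PySem.Str.join " " st.2] else st.1

-- ===== PORT B =====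
def pvNotKw (x : String) : Bool := !(pvKeywords.contains x)

-- B's outer while loop: take the head word plus the run of non-keyword words as one chunk, repeat
def pvChunks : List String → List String
  | [] => []
  | w :: ws =>
      PySem.Str.join " " (w :: ws.takeWhile pvNotKw) :: pvChunks (ws.dropWhile pvNotKw)
termination_by ws => ws.length
decreasing_by
  simpa using Nat.lt_succ_of_le (List.length_dropWhile_le pvNotKw ws)

def command_splitter_alt (raw : String) : List String :=
  pvChunks (PySem.Str.split₀ raw)

-- ===== PRECONDITION & SPEC =====
def Spec_command_splitter (raw : String) (out : List String) : Prop := out = command_splitter_alt raw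
instance (raw : String) (out : List String) : Decidable (Spec_command_splitter raw out) := by unfold Spec_command_splitter; infer_instance

-- ===== CLAIM (what is proved, stated in full; the proofs are below) =====
def Claim_equal_command_splitter : Prop := ∀ (raw : String), Dom_command_splitter raw → Spec_command_splitter raw (command_splitter raw)

-- ===== LEMMAS AND PROOFS =====

-- invariant of A's fold: with a nonempty group `cur` in progress, finishing the fold yields
-- `cmds` followed by the chunk `cur ++ <run of non-keywords>` and the chunks of the rest
lemma pvMain (ws : List String) : ∀ (cmds cur : List String), cur ≠ [] →
    (let st := ws.foldl pvStep (cmds, cur)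
     if st.2.isEmpty = false then st.1 ++ [PySem.Str.join " " st.2] else st.1)
    = cmds ++ (PySem.Str.join " " (cur ++ ws.takeWhile pvNotKw) :: pvChunks (ws.dropWhile pvNotKw)) := by
  induction ws with
  | nil =>
      intro cmds cur hcur
      simp [pvChunks, List.isEmpty_eq_false_iff, hcur]
  | cons x ws ih =>
      intro cmds cur hcur
      by_cases hx : x ∈ pvKeywords
      · have hstep : pvStep (cmds, cur) x = (cmds ++ [PySem.Str.join " " cur], [x]) := by
          simp [pvStep, hx, List.isEmpty_eq_false_iff, hcur]
        have htw : (x :: ws).takeWhile pvNotKw = [] := by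
          simp [List.takeWhile, pvNotKw, hx]
        have hdw : (x :: ws).dropWhile pvNotKw = x :: ws := by
          simp [List.dropWhile, pvNotKw, hx]
        simp only [List.foldl_cons, hstep, htw, hdw]
        rw [ih (cmds ++ [PySem.Str.join " " cur]) [x] (by simp)]
        simp [pvChunks]
      · have hstep : pvStep (cmds, cur) x = (cmds, cur ++ [x]) := by
          simp [pvStep, hx]
        have htw : (x :: ws).takeWhile pvNotKw = x :: ws.takeWhile pvNotKw := by
          simp [List.takeWhile, pvNotKw, hx]
        have hdw : (x :: ws).dropWhile pvNotKw = ws.dropWhile pvNotKw := by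
          simp [List.dropWhile, pvNotKw, hx]
        simp only [List.foldl_cons, hstep, htw, hdw]
        rw [ih cmds (cur ++ [x]) (by simp)]
        simp

lemma pvFold_eq_chunks (ws : List String) :
    (let st := ws.foldl pvStep ([], [])
     if st.2.isEmpty = false then st.1 ++ [PySem.Str.join " " st.2] else st.1)
    = pvChunks ws := by
  cases ws with
  | nil => simp [pvChunks]
  | cons w ws =>
      have hfirst : pvStep ([], []) w = ([], [w]) := by
        by_cases hw : w ∈ pvKeywords <;> simp [pvStep, hw]
      simp only [List.foldl_cons, hfirst]
      rw [pvMain ws [] [w] (by simp)]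
      simp [pvChunks]

-- ===== VERDICT (by name: the statement is the Claim_ definition above) =====
theorem command_splitter_spec : Claim_equal_command_splitter := by
  intro raw _
  unfold Spec_command_splitter command_splitter command_splitter_alt
  exact pvFold_eq_chunks (PySem.Str.split₀ raw)
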